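-- pv_equiv track=rewrite | github.com/tony9402/baekjoon-solution | solutions/python/4881/main.py | solution
-- ===== SOURCE A (Python) =====
-- from typing import List
--
-- def get_next(N: int) -> int:
--     ret = 0
--     while N > 0:
--         x = N % 10
--         ret += x * x
--         N //= 10
--     return ret
--
-- def get_sequence(N: int) -> List[int]:
--     cur = N
--     ret, used = [cur], {cur,}
--     while True:
--         nxt = get_next(cur)
--         if nxt in used: break
--         used.add(nxt)
--         ret.append(nxt)
--         cur = nxt
--     return ret
--
-- def solution(A: int, B: int) -> int:
--     answer, mn = 0, 10**9
--     flag = False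
--     seqA, seqB = get_sequence(A), get_sequence(B)
--     d = {x:idx for idx, x in enumerate(seqA, 1)}
--     for x in seqB:
--         answer += 1
--         mn = min(mn, answer + d.get(x, 10 ** 9))
--     answer = 0 if mn == 10 ** 9 else mn
--     return answer
-- ===== SOURCE B (Python) =====
-- from typing import List
--
-- def get_next(N: int) -> int:
--     ret = 0
--     while N > 0:
--         x = N % 10
--         ret += x * x
--         N //= 10
--     return ret
--
-- def get_sequence(N: int) -> List[int]:
--     cur = N
--     ret, used = [cur], {cur,}
--     while True:
--         nxt = get_next(cur)
--         if nxt in used: break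
--         used.add(nxt)
--         ret.append(nxt)
--         cur = nxt
--     return ret
--
-- def solution(A: int, B: int) -> int:
--     seqA, seqB = get_sequence(A), get_sequence(B)
--     best = None
--     for posB, x in enumerate(seqB, 1):
--         for posA, y in enumerate(seqA, 1):
--             if x == y and (best is None or posA + posB < best):
--                 best = posA + posB
--     return 0 if best is None else best
-- ===== Notes on version B (the rewrite author's own statement) =====
-- stated objective: alternative
-- what changed: Replaced the prebuilt position-dict over seqA and the sentinel-10^9 running minimum by a direct nested scan of the two sequences that keeps an Option running minimum of posA+posB over matches.
import Mathlib
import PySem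

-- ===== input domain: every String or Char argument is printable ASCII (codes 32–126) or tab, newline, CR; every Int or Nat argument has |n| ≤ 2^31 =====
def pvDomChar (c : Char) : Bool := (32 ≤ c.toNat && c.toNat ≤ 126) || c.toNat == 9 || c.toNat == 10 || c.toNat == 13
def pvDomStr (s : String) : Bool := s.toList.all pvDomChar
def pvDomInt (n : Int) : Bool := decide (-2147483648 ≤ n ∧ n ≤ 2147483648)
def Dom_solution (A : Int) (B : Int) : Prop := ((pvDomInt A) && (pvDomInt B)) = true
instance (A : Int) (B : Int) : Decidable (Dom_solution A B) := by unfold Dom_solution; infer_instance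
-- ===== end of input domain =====

-- B replaces A's position dict over seqA by a nested two-sequence scan with an Option running minimum (alternative decomposition, same results).

-- ===== PORT A =====
-- while N > 0 loop of get_next; fuel 40 covers any |N| ≤ 2^31 (≤ 10 digits) and all loop values
def getNextLoop : Nat → Int → Int → Int
  | 0, _, ret => ret
  | f + 1, N, ret =>
    if N > 0 then
      getNextLoop f (PySem.Int.floordiv N 10) (ret + PySem.Int.mod N 10 * PySem.Int.mod N 10)
    else ret

def getNext (N : Int) : Int := getNextLoop 40 N 0

-- while True loop of get_sequence; fuel 1000 covers Dom (all values after the first step lie in [0,810], so < 812 iterations)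
def getSeqLoop : Nat → Int → List Int → PySem.Set Int → List Int
  | 0, _, ret, _ => ret
  | f + 1, cur, ret, used =>
    let nxt := getNext cur
    if PySem.Set.contains used nxt then ret
    else getSeqLoop f nxt (ret ++ [nxt]) (PySem.Set.add used nxt)

def getSequence (N : Int) : List Int := getSeqLoop 1000 N [N] (PySem.Set.ofList [N])

-- d = {x: idx for idx, x in enumerate(seqA, 1)}
def dictLoop : List Int → Int → PySem.Dict Int Int → PySem.Dict Int Int
  | [], _, d => d
  | x :: xs, idx, d => dictLoop xs (idx + 1) (d.insert x idx)

-- for x in seqB: answer += 1; mn = min(mn, answer + d.get(x, 10**9))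
def aLoop (d : PySem.Dict Int Int) : List Int → Int → Int → Int
  | [], _, mn => mn
  | x :: xs, ans, mn => aLoop d xs (ans + 1) (min mn ((ans + 1) + d.getD x 1000000000))

def solution (A : Int) (B : Int) : Int :=
  let seqA := getSequence A
  let seqB := getSequence B
  let d := dictLoop seqA 1 PySem.Dict.empty
  let mn := aLoop d seqB 0 1000000000
  if mn = 1000000000 then 0 else mn

-- ===== PORT B =====
-- inner: for posA, y in enumerate(seqA, 1): if x == y and (best is None or posA+posB < best): best = posA+posB
def innerLoop (x posB : Int) : List Int → Int → Option Int → Option Int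
  | [], _, best => best
  | y :: ys, posA, best =>
    innerLoop x posB ys (posA + 1)
      (if x = y then
        match best with
        | none => some (posA + posB)
        | some v => if posA + posB < v then some (posA + posB) else some v
      else best)

def outerLoop (seqA : List Int) : List Int → Int → Option Int → Option Int
  | [], _, best => best
  | x :: xs, posB, best => outerLoop seqA xs (posB + 1) (innerLoop x posB seqA 1 best)

def solution_alt (A : Int) (B : Int) : Int :=
  let seqA := getSequence A
  let seqB := getSequence B
  match outerLoop seqA seqB 1 none with
  | none => 0
  | some v => v

-- ===== PRECONDITION & SPEC =====
def Spec_solution (A : Int) (B : Int) (out : Int) : Prop := out = solution_alt A B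
instance (A : Int) (B : Int) (out : Int) : Decidable (Spec_solution A B out) := by unfold Spec_solution; infer_instance

-- ===== CLAIM (what is proved, stated in full; the proofs are below) =====
def Claim_equal_solution : Prop := ∀ (A : Int) (B : Int), Dom_solution A B → Spec_solution A B (solution A B)

-- ===== LEMMAS AND PROOFS =====

-- the sequence loop keeps ret duplicate-free (ret ⊆ used, and new values are not in used)
theorem getSeqLoop_nodup (fuel : Nat) : ∀ (cur : Int) (ret : List Int) (used : PySem.Set Int),
    ret.Nodup → (∀ x ∈ ret, x ∈ used) → (getSeqLoop fuel cur ret used).Nodup := by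
  induction fuel with
  | zero => intro cur ret used h _; simpa [getSeqLoop] using h
  | succ f ih =>
    intro cur ret used h hsub
    simp only [getSeqLoop]
    by_cases hc : getNext cur ∈ used
    · simp [hc, h]
    · have hnm : getNext cur ∉ used := hc
      rw [if_neg (by simpa using hc)]
      apply ih
      · refine List.Nodup.append h (by simp) (List.disjoint_singleton.2 ?_)
        intro hmem
        exact hnm (hsub _ hmem)
      · intro x hx
        rcases List.mem_append.1 hx with hx | hx
        · simp only [PySem.Set.add]
          split <;> simp [hsub x hx]
        · simp only [List.mem_singleton] at hx
          subst hx
          simp only [PySem.Set.add]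
          split <;> simp_all [PySem.Set.contains]

theorem getSeqLoop_len (fuel : Nat) : ∀ (cur : Int) (ret : List Int) (used : PySem.Set Int),
    (getSeqLoop fuel cur ret used).length ≤ ret.length + fuel := by
  induction fuel with
  | zero => intro cur ret used; simp [getSeqLoop]
  | succ f ih =>
    intro cur ret used
    simp only [getSeqLoop]
    split
    · omega
    · have := ih (getNext cur) (ret ++ [getNext cur]) (PySem.Set.add used (getNext cur))
      simp at this; omega

theorem getSequence_nodup (N : Int) : (getSequence N).Nodup := by
  apply getSeqLoop_nodup <;> simp [PySem.Set.ofList, PySem.Set.add, PySem.Set.empty]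

theorem getSequence_len (N : Int) : (getSequence N).length ≤ 1001 := by
  have := getSeqLoop_len 1000 N [N] (PySem.Set.ofList [N])
  simpa using this

-- dict lookup: key absent from the scanned part
theorem dictLoop_getD_not_mem : ∀ (xs : List Int) (i : Int) (d : PySem.Dict Int Int) (y : Int),
    y ∉ xs → (dictLoop xs i d).getD y 1000000000 = d.getD y 1000000000 := by
  intro xs
  induction xs with
  | nil => intro i d y _; rfl
  | cons x t ih =>
    intro i d y hy
    simp only [List.mem_cons, not_or] at hy
    rw [dictLoop, ih _ _ _ hy.2, PySem.Dict.getD_insert_of_ne d i 1000000000 hy.1]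

-- dict lookup: seqA is duplicate-free, so d.get(y, BIG) is i + index of y
theorem dictLoop_getD_mem : ∀ (xs : List Int) (i : Int) (d : PySem.Dict Int Int) (y : Int),
    xs.Nodup → y ∈ xs → (dictLoop xs i d).getD y 1000000000 = i + (xs.idxOf y : Int) := by
  intro xs
  induction xs with
  | nil => intro i d y _ h; simp at h
  | cons x t ih =>
    intro i d y hnd hy
    rw [dictLoop]
    rcases List.mem_cons.1 hy with h | h
    · subst h
      have hnt : y ∉ t := (List.nodup_cons.1 hnd).1
      rw [dictLoop_getD_not_mem _ _ _ _ hnt, PySem.Dict.getD_insert_self d y i 1000000000,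
          List.idxOf_cons_self]
      simp
    · have hne : y ≠ x := fun he => (List.nodup_cons.1 hnd).1 (he ▸ h)
      rw [ih _ _ _ (List.nodup_cons.1 hnd).2 h, List.idxOf_cons_ne _ (Ne.symm hne)]
      push_cast; ring

-- the update B\'s branch performs
def upd (best : Option Int) (c : Int) : Option Int :=
  match best with
  | none => some c
  | some v => if c < v then some c else some v

theorem innerLoop_not_mem (x posB : Int) : ∀ (ys : List Int) (posA : Int) (best : Option Int),
    x ∉ ys → innerLoop x posB ys posA best = best := by
  intro ys
  induction ys with
  | nil => intro _ _ _; rfl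
  | cons y t ih =>
    intro posA best hx
    simp only [List.mem_cons, not_or] at hx
    simp only [innerLoop, if_neg hx.1]
    exact ih _ _ hx.2

theorem innerLoop_mem (x posB : Int) : ∀ (ys : List Int) (posA : Int) (best : Option Int),
    ys.Nodup → x ∈ ys →
    innerLoop x posB ys posA best = upd best (posA + (ys.idxOf x : Int) + posB) := by
  intro ys
  induction ys with
  | nil => intro _ _ _ h; simp at h
  | cons y t ih =>
    intro posA best hnd hx
    rcases List.mem_cons.1 hx with h | h
    · subst h
      have hnt : x ∉ t := (List.nodup_cons.1 hnd).1
      simp only [innerLoop, if_true]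
      rw [innerLoop_not_mem _ _ _ _ _ hnt, List.idxOf_cons_self]
      simp [upd]
    · have hne : x ≠ y := fun he => (List.nodup_cons.1 hnd).1 (he ▸ h)
      simp only [innerLoop, if_neg hne]
      rw [ih _ _ (List.nodup_cons.1 hnd).2 h, List.idxOf_cons_ne _ (Ne.symm hne)]
      congr 1
      push_cast; ring

-- the invariant tying A\'s sentinel minimum to B\'s Option minimum
def MinInv (best : Option Int) (mn : Int) : Prop :=
  (best = none ∧ mn = 1000000000) ∨ (∃ v, best = some v ∧ mn = v ∧ v < 1000000000)

theorem main_loop (seqA : List Int) (hnd : seqA.Nodup) (hA : (seqA.length : Int) ≤ 1001) :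
    ∀ (sB : List Int) (ans : Int) (best : Option Int) (mn : Int),
      0 ≤ ans → ans + (sB.length : Int) ≤ 1001 → MinInv best mn →
      MinInv (outerLoop seqA sB (ans + 1) best) (aLoop (dictLoop seqA 1 PySem.Dict.empty) sB ans mn) := by
  intro sB
  induction sB with
  | nil => intro ans best mn _ _ hinv; simpa [outerLoop, aLoop] using hinv
  | cons x t ih =>
    intro ans best mn hans hlen hinv
    simp only [aLoop, outerLoop]
    by_cases hx : x ∈ seqA
    · have hidx : (seqA.idxOf x : Int) < 1001 := by
        have := List.idxOf_lt_length_of_mem hx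
        omega
      have hidx0 : (0 : Int) ≤ (seqA.idxOf x : Int) := by positivity
      rw [dictLoop_getD_mem _ _ _ _ hnd hx, innerLoop_mem _ _ _ _ _ hnd hx]
      have harg : (1 : Int) + (seqA.idxOf x : Int) + (ans + 1) = (ans + 1) + (1 + (seqA.idxOf x : Int)) := by ring
      rw [harg]
      set c := (ans + 1) + (1 + (seqA.idxOf x : Int)) with hcdef
      have hc : c < 1000000000 := by omega
      have hinv2 : MinInv (upd best c) (min mn c) := by
        rcases hinv with ⟨hb, hm⟩ | ⟨v, hb, hm, hv⟩
        · subst hb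
          right
          exact ⟨c, rfl, by rw [hm, min_eq_right hc.le], hc⟩
        · subst hb
          right
          by_cases hlt : c < v
          · exact ⟨c, by simp [upd, hlt], by rw [hm, min_eq_right hlt.le], hc⟩
          · exact ⟨v, by simp [upd, hlt], by rw [hm, min_eq_left (by omega)], hv⟩
      have hlen2 : (ans + 1) + (t.length : Int) ≤ 1001 := by
        simp only [List.length_cons] at hlen; push_cast at hlen; omega
      have := ih (ans + 1) (upd best c) (min mn c) (by omega) hlen2 hinv2
      simpa using this
    · rw [dictLoop_getD_not_mem _ _ _ _ hx, innerLoop_not_mem _ _ _ _ _ hx]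
      have hmn : mn ≤ 1000000000 := by
        rcases hinv with ⟨_, hm⟩ | ⟨v, _, hm, hv⟩ <;> omega
      have hge : (PySem.Dict.empty : PySem.Dict Int Int).getD x 1000000000 = 1000000000 := rfl
      rw [hge, min_eq_left (by omega)]
      have hlen2 : (ans + 1) + (t.length : Int) ≤ 1001 := by
        simp only [List.length_cons] at hlen; push_cast at hlen; omega
      have := ih (ans + 1) best mn (by omega) hlen2 hinv
      simpa using this

-- ===== VERDICT (by name: the statement is the Claim_ definition above) =====
theorem solution_spec : Claim_equal_solution := by
  intro A B _
  unfold Spec_solution solution solution_alt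
  dsimp only
  have hnd := getSequence_nodup A
  have hlenA : ((getSequence A).length : Int) ≤ 1001 := by
    exact_mod_cast getSequence_len A
  have hlenB : (0 : Int) + ((getSequence B).length : Int) ≤ 1001 := by
    have := getSequence_len B; omega
  have h := main_loop (getSequence A) hnd hlenA (getSequence B) 0 none 1000000000
    le_rfl hlenB (Or.inl ⟨rfl, rfl⟩)
  rcases h with ⟨hb, hm⟩ | ⟨v, hb, hm, hv⟩
  · simp only [zero_add] at hb
    rw [hb, hm]
    simp
  · simp only [zero_add] at hb
    rw [hb, hm]
    simp [show v ≠ 1000000000 from by omega]
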